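-- pv_equiv track=rewrite | github.com/shakedasido/Numerical_Analysis | interpolation.py | switch_rows
-- ===== SOURCE A (Python) =====
-- def create_mtx_i(rows, cols):
--     """
--         create a new identity matrix
--
--         Parameters
--         ----------
--         rows: int
--         cols: int
--
--         Returns
--         -------
--         The new identity matrix.
--
--     """
--
--     i_mtx = []
--     for i in range(rows):
--         new_matrix_row = []
--         for j in range(cols):
--             if i == j:
--                 new_matrix_row.append(1)
--             else:
--                 new_matrix_row.append(0)
--         i_mtx.append(new_matrix_row)
--     return i_mtx
--
-- def mul_mtx_with_mtx(mtx1, mtx2):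
--     """
--         multiple one matrix in another
--
--         Parameters
--         ----------
--         mtx1: nested list (nXn) (elementary)
--         mtx2: nested list (nXn)
--
--         Returns
--         -------
--         The new matrix out of the multiplication.
--
--     """
--     new_matrix = []
--     a = 0
--     for i in range(len(mtx1)):
--         new_matrix_row = []
--         for j in range(len(mtx2[0])):
--             for k in range(len(mtx2)):
--                 a += mtx1[i][k] * mtx2[k][j]
--             new_matrix_row.append(a)
--             a = 0
--         new_matrix.append(new_matrix_row)
--
--     return new_matrix
--
-- def switch_rows(mtx, vector_b):
--     """
--         func that replace rows.
--
--         Parameters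
--         ----------
--         mtx : nested list (nXn)
--         vector_b: list
--
--         Returns
--         -------
--         matrix after changing rows pivoting process.
--
--     """
--     for i in range(len(mtx)):
--         pivot = abs(mtx[i][i])
--         for j in range(i, len(mtx)):
--             if abs(mtx[j][i]) > pivot:
--                 elementary_switched = create_mtx_i(len(mtx[0]), len(mtx))
--                 # switch the rows in elementary_switched matrix in order to have bigger pivot
--                 temp_row_el = elementary_switched[j]
--                 elementary_switched[j] = elementary_switched[i]
--                 elementary_switched[i] = temp_row_el
--                 # mul the matrix with the elementary matrix
--                 mtx = mul_mtx_with_mtx(elementary_switched, mtx)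
--                 vector_b = mul_mtx_with_mtx(elementary_switched, vector_b)
--                 pivot = abs(mtx[i][i])
--
--     return [mtx, vector_b]
-- ===== SOURCE B (Python) =====
-- def switch_rows(mtx, vector_b):
--     """Partial-pivoting row swaps done directly on copied row lists:
--     no elementary matrices and no matrix multiplications."""
--     n = len(mtx)
--     new_mtx = list(mtx)
--     new_b = list(vector_b)
--     for i in range(n):
--         pivot = abs(new_mtx[i][i])
--         for j in range(i, n):
--             if abs(new_mtx[j][i]) > pivot:
--                 new_mtx[i], new_mtx[j] = new_mtx[j], new_mtx[i]
--                 new_b[i], new_b[j] = new_b[j], new_b[i]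
--                 pivot = abs(new_mtx[i][i])
--     return [new_mtx, new_b]
-- ===== Notes on version B (the rewrite author's own statement) =====
-- stated objective: faster
-- what changed: B swaps the rows directly in copied row lists during the pivot scan instead of A's constructing an n-by-n elementary identity matrix and performing two full matrix multiplications on every accepted swap.
-- outside the precondition, e.g. on switch_rows([[0, 1], [1, 0]], [[5]]): A returns [[[1, 0], [0, 1]], [[0], [5]]], B raises IndexError; on switch_rows([[1, 2], [3]], [[1], [2]]): A raises IndexError, B returns [[[3], [1, 2]], [[2], [1]]]
import Mathlib
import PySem

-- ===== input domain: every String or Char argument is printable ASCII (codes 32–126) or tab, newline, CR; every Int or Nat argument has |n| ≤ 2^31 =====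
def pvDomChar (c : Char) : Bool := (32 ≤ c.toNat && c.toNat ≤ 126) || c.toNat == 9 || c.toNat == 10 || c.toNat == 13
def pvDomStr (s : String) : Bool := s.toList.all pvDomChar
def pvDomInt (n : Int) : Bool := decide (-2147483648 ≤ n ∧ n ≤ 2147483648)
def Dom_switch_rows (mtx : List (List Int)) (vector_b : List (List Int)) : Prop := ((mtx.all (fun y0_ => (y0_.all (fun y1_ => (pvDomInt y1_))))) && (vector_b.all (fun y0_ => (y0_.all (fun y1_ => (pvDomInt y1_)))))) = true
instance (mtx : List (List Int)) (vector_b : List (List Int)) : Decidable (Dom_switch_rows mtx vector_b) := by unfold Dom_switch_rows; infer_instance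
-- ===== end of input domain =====

-- B performs the pivoting row swaps directly on copied row lists instead of A's building an n×n
-- elementary identity matrix and running two full matrix multiplications per accepted swap
-- (objective: faster).

-- ===== PORT A =====
-- Indices produced by Python's `range` loops are nonnegative and, on inputs admitted by
-- Pre_switch_rows, in range, so plain `List.getD` indexing is exact there.
-- Python evaluates `range(i, len(mtx))` on the current mtx; under Pre_switch_rows the length is
-- invariant across the loop (the elementary factor is n×n), so the constant `n - i` is exact.
def create_mtx_i (rows cols : Nat) : List (List Int) :=
  (List.range rows).map (fun i => (List.range cols).map (fun j => if i = j then (1 : Int) else 0))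

def mul_mtx_with_mtx (mtx1 mtx2 : List (List Int)) : List (List Int) :=
  (List.range mtx1.length).map (fun i =>
    (List.range (mtx2.headD []).length).map (fun j =>
      (List.range mtx2.length).foldl (fun a k =>
        a + (mtx1.getD i []).getD k 0 * (mtx2.getD k []).getD j 0) 0))

def switch_rows (mtx : List (List Int)) (vector_b : List (List Int)) : List (List (List Int)) :=
  let n := mtx.length
  let st := (List.range n).foldl (fun (st : List (List Int) × List (List Int)) i =>
    ((List.range' i (n - i)).foldl (fun (s : (List (List Int) × List (List Int)) × Int) j =>
        if |((s.1.1.getD j []).getD i 0)| > s.2 then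
          let el := create_mtx_i (s.1.1.headD []).length s.1.1.length
          let el2 := (el.set j (el.getD i [])).set i (el.getD j [])
          let m' := mul_mtx_with_mtx el2 s.1.1
          let b' := mul_mtx_with_mtx el2 s.1.2
          ((m', b'), |((m'.getD i []).getD i 0)|)
        else s)
      (st, |((st.1.getD i []).getD i 0)|)).1) (mtx, vector_b)
  [st.1, st.2]


-- ===== PORT B =====
def switch_rows_alt (mtx : List (List Int)) (vector_b : List (List Int)) : List (List (List Int)) :=
  let n := mtx.length
  let st := (List.range n).foldl (fun (st : List (List Int) × List (List Int)) i =>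
    ((List.range' i (n - i)).foldl (fun (s : (List (List Int) × List (List Int)) × Int) j =>
        if |((s.1.1.getD j []).getD i 0)| > s.2 then
          let m' := (s.1.1.set i (s.1.1.getD j [])).set j (s.1.1.getD i [])
          let b' := (s.1.2.set i (s.1.2.getD j [])).set j (s.1.2.getD i [])
          ((m', b'), |((m'.getD i []).getD i 0)|)
        else s)
      (st, |((st.1.getD i []).getD i 0)|)).1) (mtx, vector_b)
  [st.1, st.2]

-- ===== PRECONDITION & SPEC =====
-- Pre_ admits matrices of at most one row (with a nonempty first row when there is one, else
-- Python raises IndexError) paired with any vector_b, and square matrices paired with a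
-- rectangular vector_b of the same height; it excludes other shapes, on which A raises
-- (IndexError inside the multiplication) or its multiplication silently truncates, zero-pads or
-- reshapes the rows it returns.
def Pre_switch_rows (mtx : List (List Int)) (vector_b : List (List Int)) : Prop :=
  (mtx.length ≤ 1 ∧ (mtx.length = 1 → mtx.getD 0 [] ≠ []))
  ∨ ((∀ r ∈ mtx, r.length = mtx.length) ∧ vector_b.length = mtx.length ∧
     (∀ r ∈ vector_b, r.length = (vector_b.headD []).length))
instance (mtx : List (List Int)) (vector_b : List (List Int)) : Decidable (Pre_switch_rows mtx vector_b) := by unfold Pre_switch_rows; infer_instance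

def pvWitness_switch_rows : List (List Int) × List (List Int) := ([[0,1],[1,0]], [[1],[2]])

def Spec_switch_rows (mtx : List (List Int)) (vector_b : List (List Int)) (out : List (List (List Int))) : Prop := out = switch_rows_alt mtx vector_b
instance (mtx : List (List Int)) (vector_b : List (List Int)) (out : List (List (List Int))) : Decidable (Spec_switch_rows mtx vector_b out) := by unfold Spec_switch_rows; infer_instance

-- ===== CLAIM (what is proved, stated in full; the proofs are below) =====
def Claim_equal_switch_rows : Prop := ∀ (mtx : List (List Int)) (vector_b : List (List Int)), Dom_switch_rows mtx vector_b → Pre_switch_rows mtx vector_b → Spec_switch_rows mtx vector_b (switch_rows mtx vector_b)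

-- ===== LEMMAS AND PROOFS =====

theorem pv_getD_set_eq {α : Type} [Inhabited α] (l : List α) (i : Nat) (a d : α) (h : i < l.length) :
    (l.set i a).getD i d = a := by
  simp [List.getD_eq_getElem?_getD, h]

theorem pv_getD_set_ne {α : Type} [Inhabited α] (l : List α) (i k : Nat) (a d : α) (h : i ≠ k) :
    (l.set i a).getD k d = l.getD k d := by
  simp [List.getD_eq_getElem?_getD, List.getElem?_set_ne h]

theorem pv_map_getD_range {α : Type} (l : List α) (d : α) :
    (List.range l.length).map (fun j => l.getD j d) = l := by
  apply List.ext_getElem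
  · simp
  · intro i h1 h2
    simp [List.getD_eq_getElem?_getD, List.getElem?_eq_getElem h2]

theorem pv_sum_delta (N t : Nat) (f : Nat → Int) (h : t < N) :
    ((List.range N).map (fun k => (if t = k then (1:Int) else 0) * f k)).sum = f t := by
  induction N with
  | zero => omega
  | succ N ih =>
    rw [List.range_succ, List.map_append, List.sum_append]
    by_cases ht : t = N
    · subst ht
      have : ((List.range t).map (fun k => (if t = k then (1:Int) else 0) * f k)).sum = 0 := by
        apply List.sum_eq_zero; intro x hx
        simp only [List.mem_map, List.mem_range] at hx
        obtain ⟨k, hk, rfl⟩ := hx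
        simp [Nat.ne_of_gt hk]
      rw [show (fun k => (if t = k then (1:Int) else 0) * f k) = (fun k => if t = k then f k else 0) from by funext k; by_cases hk : t = k <;> simp [hk]] at this ⊢
      simp [this]
    · have := ih (by omega)
      rw [show (fun k => (if t = k then (1:Int) else 0) * f k) = (fun k => if t = k then f k else 0) from by funext k; by_cases hk : t = k <;> simp [hk]] at this ⊢
      simp [this, ht]

theorem pv_getD_mem {α : Type} [Inhabited α] (l : List α) (k : Nat) (d : α) (h : k < l.length) :
    l.getD k d ∈ l := by
  rw [List.getD_eq_getElem l d h]; exact List.getElem_mem h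

theorem pv_create_getD (n r : Nat) (h : r < n) :
    (create_mtx_i n n).getD r [] = (List.range n).map (fun c => if r = c then (1:Int) else 0) := by
  simp [create_mtx_i, List.getD_eq_getElem?_getD, List.getElem?_map, List.getElem?_range h]

-- A's elementary matrix has row r = the (swap i j applied to r)-th unit row
theorem pv_el2_getD (n i j r : Nat) (hi : i < n) (hj : j < n) (hr : r < n) :
    ((((create_mtx_i n n).set j ((create_mtx_i n n).getD i [])).set i ((create_mtx_i n n).getD j []))).getD r []
    = (List.range n).map (fun c => if (if r = i then j else if r = j then i else r) = c then (1:Int) else 0) := by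
  have hell : (create_mtx_i n n).length = n := by simp [create_mtx_i]
  by_cases hri : r = i
  · rw [hri]
    rw [pv_getD_set_eq _ _ _ _ (by simp [hell]; omega)]
    rw [pv_create_getD n j hj]
    simp
  · rw [pv_getD_set_ne _ _ _ _ _ (fun h => hri h.symm)]
    by_cases hrj : r = j
    · rw [hrj]
      rw [pv_getD_set_eq _ _ _ _ (by simp [hell]; omega)]
      rw [pv_create_getD n i hi]
      have hji : ¬ j = i := fun h => hri (hrj.trans h)
      simp [hji]
    · rw [pv_getD_set_ne _ _ _ _ _ (fun h => hrj h.symm)]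
      rw [pv_create_getD n r hr]
      simp [hri, hrj]

-- B's simultaneous swap, read back entrywise
theorem pv_swap_getD {α : Type} [Inhabited α] (l : List α) (n i j r : Nat) (d : α)
    (hpl : l.length = n) (_hi : i < n) (_hj : j < n) (hr : r < n) :
    ((l.set i (l.getD j d)).set j (l.getD i d)).getD r d
      = l.getD (if r = i then j else if r = j then i else r) d := by
  by_cases hrj : r = j
  · rw [hrj, pv_getD_set_eq _ _ _ _ (by simp; omega)]
    by_cases hij : j = i
    · simp [hij]
    · simp [hij]
  · rw [pv_getD_set_ne _ _ _ _ _ (fun h => hrj h.symm)]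
    by_cases hri : r = i
    · rw [hri, pv_getD_set_eq _ _ _ _ (by omega)]
      simp
    · rw [pv_getD_set_ne _ _ _ _ _ (fun h => hri h.symm)]
      simp [hri, hrj]

-- shape invariant: n rows, each of width p
def pvInv (n p : Nat) (m : List (List Int)) : Prop :=
  m.length = n ∧ ∀ r ∈ m, r.length = p

theorem pv_inv_swap (m : List (List Int)) (n p i j : Nat) (hinv : pvInv n p m)
    (hi : i < n) (hj : j < n) :
    pvInv n p ((m.set i (m.getD j [])).set j (m.getD i [])) := by
  obtain ⟨hl, hr⟩ := hinv
  constructor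
  · simp [hl]
  · intro r hrm
    rcases List.mem_or_eq_of_mem_set hrm with h | h
    · rcases List.mem_or_eq_of_mem_set h with h' | h'
      · exact hr r h'
      · subst h'
        exact hr _ (pv_getD_mem m j [] (by omega))
    · subst h
      exact hr _ (pv_getD_mem m i [] (by omega))

theorem pv_headD_len (xs : List (List Int)) (n p : Nat) (hinv : pvInv n p xs) (hn : 0 < n) :
    (xs.headD []).length = p := by
  obtain ⟨hl, hr⟩ := hinv
  have hh : xs.headD [] = xs.getD 0 [] := by
    cases xs with
    | nil => simp at hl; omega
    | cons a l => simp
  rw [hh]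
  exact hr _ (pv_getD_mem xs 0 [] (by omega))

-- multiplying by the swapped identity IS swapping the two rows
theorem pv_mul_elSwap (xs : List (List Int)) (n p i j : Nat)
    (hinv : pvInv n p xs) (hi : i < n) (hj : j < n) :
    mul_mtx_with_mtx
      ((((create_mtx_i n n).set j ((create_mtx_i n n).getD i [])).set i ((create_mtx_i n n).getD j [])))
      xs
    = (xs.set i (xs.getD j [])).set j (xs.getD i []) := by
  obtain ⟨hxl, hxr⟩ := hinv
  have hell : (create_mtx_i n n).length = n := by simp [create_mtx_i]
  have hmhead : (xs.headD []).length = p := pv_headD_len xs n p ⟨hxl, hxr⟩ (by omega)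
  apply List.ext_getElem
  · simp [mul_mtx_with_mtx, hell, hxl]
  · intro r h1 h2
    have hr : r < n := by simp at h2; omega
    have hσr : (if r = i then j else if r = j then i else r) < n := by split_ifs <;> omega
    have hB : ((xs.set i (xs.getD j [])).set j (xs.getD i []))[r]
        = xs.getD (if r = i then j else if r = j then i else r) [] := by
      rw [← List.getD_eq_getElem _ [] h2]
      exact pv_swap_getD xs n i j r [] hxl hi hj hr
    have hA : (mul_mtx_with_mtx ((((create_mtx_i n n).set j ((create_mtx_i n n).getD i [])).set i ((create_mtx_i n n).getD j []))) xs)[r]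
        = (List.range p).map (fun j0 =>
            (List.range n).foldl (fun a k =>
              a + (((((create_mtx_i n n).set j ((create_mtx_i n n).getD i [])).set i ((create_mtx_i n n).getD j []))).getD r []).getD k 0
                * (xs.getD k []).getD j0 0) 0) := by
      simp only [mul_mtx_with_mtx, List.getElem_map, List.getElem_range, hmhead, hxl]
    rw [hA, hB]
    have hsum : ∀ j0 : Nat,
        (List.range n).foldl (fun a k =>
            a + (((((create_mtx_i n n).set j ((create_mtx_i n n).getD i [])).set i ((create_mtx_i n n).getD j []))).getD r []).getD k 0
              * (xs.getD k []).getD j0 0) 0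
          = (xs.getD (if r = i then j else if r = j then i else r) []).getD j0 0 := by
      intro j0
      rw [PySem.List.foldl_add]
      have hmap : (List.range n).map (fun k =>
            (((((create_mtx_i n n).set j ((create_mtx_i n n).getD i [])).set i ((create_mtx_i n n).getD j []))).getD r []).getD k 0
              * (xs.getD k []).getD j0 0)
          = (List.range n).map (fun k =>
              (if (if r = i then j else if r = j then i else r) = k then (1:Int) else 0)
                * ((xs.getD k []).getD j0 0)) := by
        apply List.map_congr_left
        intro k hk
        rw [List.mem_range] at hk
        rw [pv_el2_getD n i j r hi hj hr]
        congr 1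
        simp [List.getD_eq_getElem?_getD, List.getElem?_map, List.getElem?_range hk]
      rw [hmap, pv_sum_delta n _ _ hσr]
      ring_nf
    calc (List.range p).map (fun j0 =>
            (List.range n).foldl (fun a k =>
              a + (((((create_mtx_i n n).set j ((create_mtx_i n n).getD i [])).set i ((create_mtx_i n n).getD j []))).getD r []).getD k 0
                * (xs.getD k []).getD j0 0) 0)
        = (List.range p).map (fun j0 => (xs.getD (if r = i then j else if r = j then i else r) []).getD j0 0) := by
          apply List.map_congr_left; intro j0 _; exact hsum j0
      _ = xs.getD (if r = i then j else if r = j then i else r) [] := by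
          have h := pv_map_getD_range (xs.getD (if r = i then j else if r = j then i else r) []) (0:Int)
          rw [hxr _ (pv_getD_mem xs _ [] (by omega))] at h
          exact h

theorem pv_inner_sim (n p : Nat) (i : Nat) (hi : i < n) :
    ∀ (L : List Nat), (∀ j ∈ L, j < n) →
    ∀ (m b : List (List Int)) (piv : Int), pvInv n n m → pvInv n p b →
    (L.foldl (fun (s : (List (List Int) × List (List Int)) × Int) j =>
        if |((s.1.1.getD j []).getD i 0)| > s.2 then
          let el := create_mtx_i (s.1.1.headD []).length s.1.1.length
          let el2 := (el.set j (el.getD i [])).set i (el.getD j [])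
          let m' := mul_mtx_with_mtx el2 s.1.1
          let b' := mul_mtx_with_mtx el2 s.1.2
          ((m', b'), |((m'.getD i []).getD i 0)|)
        else s) ((m, b), piv))
      = (L.foldl (fun (s : (List (List Int) × List (List Int)) × Int) j =>
          if |((s.1.1.getD j []).getD i 0)| > s.2 then
            let m' := (s.1.1.set i (s.1.1.getD j [])).set j (s.1.1.getD i [])
            let b' := (s.1.2.set i (s.1.2.getD j [])).set j (s.1.2.getD i [])
            ((m', b'), |((m'.getD i []).getD i 0)|)
          else s) ((m, b), piv))
      ∧ pvInv n n (L.foldl (fun (s : (List (List Int) × List (List Int)) × Int) j =>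
          if |((s.1.1.getD j []).getD i 0)| > s.2 then
            let m' := (s.1.1.set i (s.1.1.getD j [])).set j (s.1.1.getD i [])
            let b' := (s.1.2.set i (s.1.2.getD j [])).set j (s.1.2.getD i [])
            ((m', b'), |((m'.getD i []).getD i 0)|)
          else s) ((m, b), piv)).1.1
      ∧ pvInv n p (L.foldl (fun (s : (List (List Int) × List (List Int)) × Int) j =>
          if |((s.1.1.getD j []).getD i 0)| > s.2 then
            let m' := (s.1.1.set i (s.1.1.getD j [])).set j (s.1.1.getD i [])
            let b' := (s.1.2.set i (s.1.2.getD j [])).set j (s.1.2.getD i [])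
            ((m', b'), |((m'.getD i []).getD i 0)|)
          else s) ((m, b), piv)).1.2 := by
  intro L
  induction L with
  | nil => intro _ m b piv hm hb; exact ⟨rfl, hm, hb⟩
  | cons j L ih =>
    intro hL m b piv hm hb
    have hj : j < n := hL j (List.mem_cons_self)
    have hL' : ∀ j' ∈ L, j' < n := fun j' h => hL j' (List.mem_cons_of_mem _ h)
    simp only [List.foldl_cons]
    by_cases hc : |(m.getD j []).getD i 0| > piv
    · rw [if_pos hc, if_pos hc]
      have hmh : (m.headD []).length = n := pv_headD_len m n n hm (by omega)
      simp only [hmh, hm.1]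
      rw [pv_mul_elSwap m n n i j hm hi hj, pv_mul_elSwap b n p i j hb hi hj]
      exact ih hL' _ _ _ (pv_inv_swap m n n i j hm hi hj) (pv_inv_swap b n p i j hb hi hj)
    · rw [if_neg hc, if_neg hc]
      exact ih hL' m b piv hm hb

theorem pv_outer_sim (n p : Nat) :
    ∀ (L : List Nat), (∀ i ∈ L, i < n) →
    ∀ (m b : List (List Int)), pvInv n n m → pvInv n p b →
    (L.foldl (fun (st : List (List Int) × List (List Int)) i =>
        ((List.range' i (n - i)).foldl (fun (s : (List (List Int) × List (List Int)) × Int) j =>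
            if |((s.1.1.getD j []).getD i 0)| > s.2 then
              let el := create_mtx_i (s.1.1.headD []).length s.1.1.length
              let el2 := (el.set j (el.getD i [])).set i (el.getD j [])
              let m' := mul_mtx_with_mtx el2 s.1.1
              let b' := mul_mtx_with_mtx el2 s.1.2
              ((m', b'), |((m'.getD i []).getD i 0)|)
            else s) (st, |((st.1.getD i []).getD i 0)|)).1) (m, b))
      = (L.foldl (fun (st : List (List Int) × List (List Int)) i =>
          ((List.range' i (n - i)).foldl (fun (s : (List (List Int) × List (List Int)) × Int) j =>
              if |((s.1.1.getD j []).getD i 0)| > s.2 then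
                let m' := (s.1.1.set i (s.1.1.getD j [])).set j (s.1.1.getD i [])
                let b' := (s.1.2.set i (s.1.2.getD j [])).set j (s.1.2.getD i [])
                ((m', b'), |((m'.getD i []).getD i 0)|)
              else s) (st, |((st.1.getD i []).getD i 0)|)).1) (m, b)) := by
  intro L
  induction L with
  | nil => intro _ m b _ _; rfl
  | cons i L ih =>
    intro hL m b hm hb
    have hi : i < n := hL i (List.mem_cons_self)
    have hL' : ∀ i' ∈ L, i' < n := fun i' h => hL i' (List.mem_cons_of_mem _ h)
    simp only [List.foldl_cons]
    have hjs : ∀ j ∈ List.range' i (n - i), j < n := by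
      intro j hjm
      rw [List.mem_range'_1] at hjm
      omega
    obtain ⟨heq, hm', hb'⟩ := pv_inner_sim n p i hi (List.range' i (n - i)) hjs m b
      (|(m.getD i []).getD i 0|) hm hb
    rw [heq]
    exact ih hL' _ _ hm' hb'

theorem pv_main (mtx vector_b : List (List Int))
    (hpre : (mtx.length ≤ 1 ∧ (mtx.length = 1 → mtx.getD 0 [] ≠ []))
      ∨ ((∀ r ∈ mtx, r.length = mtx.length) ∧ vector_b.length = mtx.length ∧
         (∀ r ∈ vector_b, r.length = (vector_b.headD []).length))) :
    switch_rows mtx vector_b = switch_rows_alt mtx vector_b := by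
  rcases hpre with ⟨hle, _⟩ | ⟨hxr, hvl, hvr⟩
  · match mtx, hle with
    | [], _ => simp [switch_rows, switch_rows_alt]
    | [a], _ =>
      simp [switch_rows, switch_rows_alt, List.range']
  · have heq := pv_outer_sim mtx.length (vector_b.headD []).length
      (List.range mtx.length) (by intro i h; rw [List.mem_range] at h; exact h)
      mtx vector_b ⟨rfl, hxr⟩ ⟨hvl, hvr⟩
    simp only [switch_rows, switch_rows_alt]
    rw [heq]

-- ===== VERDICT (by name: the statement is the Claim_ definition above) =====
theorem switch_rows_spec : Claim_equal_switch_rows := by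
  intro mtx vector_b _ hpre
  exact pv_main mtx vector_b hpre
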